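-- pv_equiv track=rewrite | github.com/Hungruong/tactic-scout | predict_model/src/process_data.py | process_runners_flat
-- ===== SOURCE A (Python) =====
-- from typing import Dict, List, Optional
--
-- def process_runners_flat(runners: List[Dict]) -> Dict:
--     """Process runners information into flattened format."""
--     scoring_position = any(
--         r.get("movement", {}).get("start") in ["2B", "3B"]
--         for r in runners
--     )
--     runs_scored = sum(
--         1 for r in runners
--         if r.get("movement", {}).get("end") == "score"
--     )
--
--     return {
--         "num_runners": len(runners),
--         "scoring_position": int(scoring_position),
--         "runs_scored": runs_scored,
--         "runner_on_first": int(any(r.get("movement", {}).get("start") == "1B" for r in runners)),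
--         "runner_on_second": int(any(r.get("movement", {}).get("start") == "2B" for r in runners)),
--         "runner_on_third": int(any(r.get("movement", {}).get("start") == "3B" for r in runners))
--     }
-- ===== SOURCE B (Python) =====
-- from typing import Dict, List
--
-- def process_runners_flat(runners: List[Dict]) -> Dict:
--     """Process runners information into flattened format (single pass)."""
--     scoring_position = False
--     runs_scored = 0
--     on_first = on_second = on_third = False
--     for r in runners:
--         mv = r.get("movement", {})
--         start = mv.get("start")
--         end = mv.get("end")
--         if start == "1B":
--             on_first = True
--         elif start == "2B":
--             on_second = True
--             scoring_position = True
--         elif start == "3B":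
--             on_third = True
--             scoring_position = True
--         if end == "score":
--             runs_scored += 1
--     return {
--         "num_runners": len(runners),
--         "scoring_position": int(scoring_position),
--         "runs_scored": runs_scored,
--         "runner_on_first": int(on_first),
--         "runner_on_second": int(on_second),
--         "runner_on_third": int(on_third),
--     }
-- ===== Notes on version B (the rewrite author's own statement) =====
-- stated objective: simpler
-- what changed: Replaces five separate scans of the runner list (any/sum/any/any/any) with a single loop maintaining five accumulators, building the same dict once at the end.
import Mathlib
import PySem

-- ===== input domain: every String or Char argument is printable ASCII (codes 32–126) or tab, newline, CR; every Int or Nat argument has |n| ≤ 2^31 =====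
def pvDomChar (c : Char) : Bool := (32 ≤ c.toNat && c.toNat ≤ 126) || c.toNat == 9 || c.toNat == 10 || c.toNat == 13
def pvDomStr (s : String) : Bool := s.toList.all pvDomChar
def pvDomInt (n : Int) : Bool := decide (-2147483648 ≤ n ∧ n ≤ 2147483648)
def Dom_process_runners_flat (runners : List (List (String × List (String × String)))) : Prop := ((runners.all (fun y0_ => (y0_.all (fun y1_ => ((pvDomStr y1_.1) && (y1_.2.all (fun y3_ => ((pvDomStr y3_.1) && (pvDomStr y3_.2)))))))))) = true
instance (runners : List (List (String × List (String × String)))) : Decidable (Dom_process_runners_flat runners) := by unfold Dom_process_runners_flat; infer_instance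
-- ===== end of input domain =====

-- B replaces A's five separate scans of the runner list with one loop over five accumulators (objective: simpler).

-- dict.get(k): first match in the association list (shared plumbing of both ports)
def pvGet (d : List (String × String)) (k : String) : Option String :=
  (d.find? (fun p => p.1 == k)).map (·.2)

-- r.get("movement", {})
def pvGetMv (r : List (String × List (String × String))) : List (String × String) :=
  (((r.find? (fun p => p.1 == "movement")).map (·.2)).getD [])

-- ===== PORT A =====
def process_runners_flat (runners : List (List (String × List (String × String)))) : List (String × Int) :=
  let scoring_position := runners.any (fun r =>
    pvGet (pvGetMv r) "start" == some "2B" || pvGet (pvGetMv r) "start" == some "3B")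
  let runs_scored : Int := runners.foldl (fun acc r =>
    if pvGet (pvGetMv r) "end" == some "score" then acc + 1 else acc) 0
  [("num_runners", (runners.length : Int)),
   ("scoring_position", if scoring_position then 1 else 0),
   ("runs_scored", runs_scored),
   ("runner_on_first", if runners.any (fun r => pvGet (pvGetMv r) "start" == some "1B") then 1 else 0),
   ("runner_on_second", if runners.any (fun r => pvGet (pvGetMv r) "start" == some "2B") then 1 else 0),
   ("runner_on_third", if runners.any (fun r => pvGet (pvGetMv r) "start" == some "3B") then 1 else 0)]

-- ===== PORT B =====
-- state = (scoring_position, runs_scored, on_first, on_second, on_third)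
def pvStepB (st : Bool × Int × Bool × Bool × Bool) (r : List (String × List (String × String))) :
    Bool × Int × Bool × Bool × Bool :=
  let mv := pvGetMv r
  let start := pvGet mv "start"
  let e := pvGet mv "end"
  let st :=
    if start == some "1B" then (st.1, st.2.1, true, st.2.2.2.1, st.2.2.2.2)
    else if start == some "2B" then (true, st.2.1, st.2.2.1, true, st.2.2.2.2)
    else if start == some "3B" then (true, st.2.1, st.2.2.1, st.2.2.2.1, true)
    else st
  if e == some "score" then (st.1, st.2.1 + 1, st.2.2) else st

def process_runners_flat_alt (runners : List (List (String × List (String × String)))) : List (String × Int) :=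
  let st := runners.foldl pvStepB (false, 0, false, false, false)
  [("num_runners", (runners.length : Int)),
   ("scoring_position", if st.1 then 1 else 0),
   ("runs_scored", st.2.1),
   ("runner_on_first", if st.2.2.1 then 1 else 0),
   ("runner_on_second", if st.2.2.2.1 then 1 else 0),
   ("runner_on_third", if st.2.2.2.2 then 1 else 0)]

-- ===== PRECONDITION & SPEC =====
def Spec_process_runners_flat (runners : List (List (String × List (String × String)))) (out : List (String × Int)) : Prop := out = process_runners_flat_alt runners
instance (runners : List (List (String × List (String × String)))) (out : List (String × Int)) : Decidable (Spec_process_runners_flat runners out) := by unfold Spec_process_runners_flat; infer_instance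

-- ===== CLAIM (what is proved, stated in full; the proofs are below) =====
def Claim_equal_process_runners_flat : Prop := ∀ (runners : List (List (String × List (String × String)))), Dom_process_runners_flat runners → Spec_process_runners_flat runners (process_runners_flat runners)

-- ===== LEMMAS AND PROOFS =====

-- number of runners whose movement end is "score" (proof-only characterisation)
def pvCntScore : List (List (String × List (String × String))) → Int
  | [] => 0
  | r :: l => (if pvGet (pvGetMv r) "end" == some "score" then 1 else 0) + pvCntScore l

lemma pvAfold (l : List (List (String × List (String × String)))) (rs : Int) :
    l.foldl (fun acc r => if pvGet (pvGetMv r) "end" == some "score" then acc + 1 else acc) rs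
      = rs + pvCntScore l := by
  induction l generalizing rs with
  | nil => simp [pvCntScore]
  | cons r l ih =>
    simp only [List.foldl_cons, pvCntScore, ih]
    split_ifs <;> omega

lemma pvBfold (l : List (List (String × List (String × String))))
    (sp : Bool) (rs : Int) (f s t : Bool) :
    l.foldl pvStepB (sp, rs, f, s, t)
      = (sp || l.any (fun r => pvGet (pvGetMv r) "start" == some "2B" || pvGet (pvGetMv r) "start" == some "3B"),
         rs + pvCntScore l,
         f || l.any (fun r => pvGet (pvGetMv r) "start" == some "1B"),
         s || l.any (fun r => pvGet (pvGetMv r) "start" == some "2B"),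
         t || l.any (fun r => pvGet (pvGetMv r) "start" == some "3B")) := by
  induction l generalizing sp rs f s t with
  | nil => simp [pvCntScore]
  | cons r l ih =>
    simp only [List.foldl_cons, List.any_cons, pvCntScore, pvStepB]
    generalize pvGet (pvGetMv r) "start" = o
    generalize pvGet (pvGetMv r) "end" = oe
    split_ifs with h1 h2 h2 h3 h3 h4 h4 <;>
      rw [ih] <;> clear ih <;> simp_all [Prod.mk.injEq, beq_eq_decide] <;> omega

-- ===== VERDICT (by name: the statement is the Claim_ definition above) =====
theorem process_runners_flat_spec : Claim_equal_process_runners_flat := by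
  intro runners _
  unfold Spec_process_runners_flat process_runners_flat process_runners_flat_alt
  rw [pvBfold, pvAfold]
  simp
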